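-- pv_equiv track=rewrite | github.com/gitsabrinelle/analytex | main.py | forme
-- ===== SOURCE A (Python) =====
-- def forme(listt):
--     cpt = 0
--     form_list = []
--
--     for i in str(listt).split():
--         if i not in form_list:
--             form_list.append(i)
--             cpt = cpt + 1
--     return cpt
-- ===== SOURCE B (Python) =====
-- def forme(listt):
--     tokens = sorted(str(listt).split())
--     cpt = 0
--     prev = None
--     for t in tokens:
--         if prev is None or t != prev:
--             cpt = cpt + 1
--         prev = t
--     return cpt
-- ===== Notes on version B (the rewrite author's own statement) =====
-- stated objective: faster
-- what changed: Replaces the quadratic membership-test/append dedup loop with sort-then-scan: sort the tokens once and count a token only when it differs from its predecessor.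
import Mathlib
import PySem

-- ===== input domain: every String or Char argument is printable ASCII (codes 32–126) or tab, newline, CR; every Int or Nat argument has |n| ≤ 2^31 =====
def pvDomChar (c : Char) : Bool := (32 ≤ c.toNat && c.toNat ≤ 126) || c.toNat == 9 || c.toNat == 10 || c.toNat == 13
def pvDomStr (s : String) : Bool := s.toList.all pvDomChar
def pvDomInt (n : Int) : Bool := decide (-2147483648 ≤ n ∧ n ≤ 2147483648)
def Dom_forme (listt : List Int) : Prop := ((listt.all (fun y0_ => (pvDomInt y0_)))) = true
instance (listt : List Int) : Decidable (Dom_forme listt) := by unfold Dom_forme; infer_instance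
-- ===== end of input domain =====

-- B replaces A's membership-test/append dedup loop with sort-then-scan (count a token
-- when it differs from its predecessor); objective: alternative algorithm, same result.

-- str(listt) for a Python list of ints: "[1, 2, 3]" (shared by both ports, as both
-- Pythons compute str(listt))
def pyStrOfIntList (xs : List Int) : String :=
  "[" ++ PySem.Str.join ", " (xs.map PySem.Int.toStr) ++ "]"

-- ===== PORT A =====
def forme (listt : List Int) : Int :=
  (((PySem.Str.split₀ (pyStrOfIntList listt)).foldl
      (fun (st : Int × List String) i =>
        if i ∉ st.2 then (st.1 + 1, st.2 ++ [i]) else st)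
      (0, []))).1

-- ===== PORT B =====
def forme_alt (listt : List Int) : Int :=
  let tokens := PySem.List.sorted (PySem.Str.split₀ (pyStrOfIntList listt)) (fun x => x) false
  ((tokens.foldl
      (fun (st : Int × Option String) t =>
        match st.2 with
        | none => (st.1 + 1, some t)
        | some p => (if t ≠ p then st.1 + 1 else st.1, some t))
      (0, none))).1

-- ===== PRECONDITION & SPEC =====
def Spec_forme (listt : List Int) (out : Int) : Prop := out = forme_alt listt
instance (listt : List Int) (out : Int) : Decidable (Spec_forme listt out) := by unfold Spec_forme; infer_instance

-- ===== CLAIM (what is proved, stated in full; the proofs are below) =====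
def Claim_equal_forme : Prop := ∀ (listt : List Int), Dom_forme listt → Spec_forme listt (forme listt)

-- ===== LEMMAS AND PROOFS =====

-- A's loop counts the distinct tokens not yet seen.
theorem formeA_fold (l : List String) (c : Int) (seen : List String) :
    ((l.foldl (fun (st : Int × List String) i =>
        if i ∉ st.2 then (st.1 + 1, st.2 ++ [i]) else st) (c, seen))).1
      = c + ((l.toFinset \ seen.toFinset).card : Int) := by
  induction l generalizing c seen with
  | nil => simp
  | cons a l ih =>
    by_cases h : a ∈ seen
    · simp only [List.foldl_cons]
      rw [if_neg (not_not_intro h), ih]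
      have : (a :: l).toFinset \ seen.toFinset = l.toFinset \ seen.toFinset := by
        ext x
        simp only [List.toFinset_cons, Finset.mem_sdiff, Finset.mem_insert, List.mem_toFinset]
        constructor
        · rintro ⟨hx | hx, hns⟩
          · exact absurd (hx ▸ h) hns
          · exact ⟨hx, hns⟩
        · rintro ⟨hx, hns⟩; exact ⟨Or.inr hx, hns⟩
      rw [this]
    · simp only [List.foldl_cons]
      rw [if_pos h, ih]
      have hset : (a :: l).toFinset \ seen.toFinset
          = insert a (l.toFinset \ (seen ++ [a]).toFinset) := by
        ext x
        simp only [List.toFinset_cons, Finset.mem_sdiff, Finset.mem_insert,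
          List.mem_toFinset, List.toFinset_append, Finset.mem_union,
          List.toFinset_cons, List.toFinset_nil, insert_empty_eq, Finset.mem_singleton]
        constructor
        · rintro ⟨hx | hx, hns⟩
          · exact Or.inl hx
          · by_cases hxa : x = a
            · exact Or.inl hxa
            · exact Or.inr ⟨hx, by tauto⟩
        · rintro (hx | ⟨hx, hns⟩)
          · exact ⟨Or.inl hx, by simpa [hx] using h⟩
          · exact ⟨Or.inr hx, by tauto⟩
      have hnot : a ∉ l.toFinset \ (seen ++ [a]).toFinset := by
        simp [Finset.mem_sdiff]
      rw [hset, Finset.card_insert_of_notMem hnot]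
      push_cast
      ring

-- B's scan over a sorted list counts the distinct elements (those ≠ the carried
-- previous element).
theorem formeB_fold (l : List String) (hs : l.Pairwise (· ≤ ·)) (c : Int)
    (o : Option String) (ho : ∀ p, o = some p → ∀ x ∈ l, p ≤ x) :
    ((l.foldl (fun (st : Int × Option String) t =>
        match st.2 with
        | none => (st.1 + 1, some t)
        | some p => (if t ≠ p then st.1 + 1 else st.1, some t)) (c, o))).1
      = c + ((match o with
              | none => l.toFinset.card
              | some p => (l.toFinset.erase p).card : ℕ) : Int) := by
  induction l generalizing c o with
  | nil => cases o <;> simp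
  | cons a l ih =>
    have hal : ∀ x ∈ l, a ≤ x := by
      intro x hx; exact List.rel_of_pairwise_cons hs hx
    have hs' : l.Pairwise (· ≤ ·) := hs.of_cons
    have key : ∀ (X : Finset String), (insert a X).card = (X.erase a).card + 1 := by
      intro X
      by_cases hX : a ∈ X
      · have hpos : 0 < X.card := Finset.card_pos.mpr ⟨a, hX⟩
        rw [Finset.insert_eq_self.mpr hX, Finset.card_erase_of_mem hX]
        omega
      · rw [Finset.card_insert_of_notMem hX, Finset.erase_eq_self.mpr hX]
    cases o with
    | none =>
      simp only [List.foldl_cons]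
      rw [ih hs' _ (some a) (by rintro p rfl1; simp_all)]
      simp only [List.toFinset_cons, key]
      push_cast; ring
    | some p =>
      have hpa : p ≤ a := ho p rfl a (List.mem_cons_self)
      by_cases hap : a = p
      · subst hap
        simp only [List.foldl_cons]
        rw [if_neg (show ¬(a ≠ a) by simp), ih hs' _ (some a) (by rintro q rfl1; simp_all)]
        congr 2
        simp only [List.toFinset_cons, Finset.erase_insert_eq_erase]
      · simp only [List.foldl_cons]
        rw [if_pos hap, ih hs' _ (some a) (by rintro q rfl1; simp_all)]
        have h1 : ((a :: l).toFinset.erase p) = insert a (l.toFinset.erase p) := by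
          simp only [List.toFinset_cons]
          exact Finset.erase_insert_of_ne (Ne.symm (by exact fun h => hap h.symm))
        have h2 : (l.toFinset.erase p) = l.toFinset := by
          rw [Finset.erase_eq_self]
          intro hp
          have : a ≤ p := hal p (List.mem_toFinset.mp hp)
          exact hap (le_antisymm hpa this).symm
        rw [h1, h2, key]
        push_cast; ring

-- ===== VERDICT (by name: the statement is the Claim_ definition above) =====
theorem forme_spec : Claim_equal_forme := by
  intro listt _
  unfold Spec_forme forme forme_alt
  set toks := PySem.Str.split₀ (pyStrOfIntList listt) with htoks
  have hperm : (PySem.List.sorted toks (fun x => x) false).Perm toks :=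
    PySem.List.sorted_perm toks (fun x => x) false
  have hpw : (PySem.List.sorted toks (fun x => x) false).Pairwise (· ≤ ·) :=
    PySem.List.sorted_pairwise toks (fun x => x)
  have hfs : (PySem.List.sorted toks (fun x => x) false).toFinset = toks.toFinset :=
    Finset.ext fun x => by simp [List.mem_toFinset, hperm.mem_iff]
  rw [formeA_fold, formeB_fold _ hpw _ none (by simp)]
  simp [hfs]
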